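-- pv_equiv track=rewrite | github.com/yakim4iik/bsuir | 4sem/aois-labs/lab5/lab5/utils.py | start_glued
-- ===== SOURCE A (Python) =====
-- def start_glued(table):
--     short_table = []
--     index = []
--     for i, vector in enumerate(table):
--         is_not_gluing = False
--         for j in range(i+1, len(table)):
--             false_index = get_gluing_index(vector, table[j])
--             if false_index >= 0:
--                 is_not_gluing = True
--                 index.append(j)
--                 new_vector = vector.copy()
--                 new_vector[false_index] = None
--                 short_table.append(new_vector)
--         if not is_not_gluing and i not in index:
--             short_table.append(vector)
--     return short_table if short_table else table
--
-- def get_gluing_index(first_vector, second_vector):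
--     result_vector = []
--     for i in range(len(first_vector)):
--         result_vector.append(first_vector[i] == second_vector[i])
--     if result_vector.count(False) == 1:
--         return result_vector.index(False)
--     return -1
-- ===== SOURCE B (Python) =====
-- def glue_pos(v, w):
--     pos = -1
--     for k in range(len(v)):
--         if v[k] != w[k]:
--             if pos != -1:
--                 return -1
--             pos = k
--     return pos
--
--
-- def start_glued(table):
--     out = []
--     for i, v in enumerate(table):
--         out += [v[:p] + [None] + v[p + 1:]
--                 for p in (glue_pos(v, w) for w in table[i + 1:]) if p != -1]
--         if all(glue_pos(u, v) == -1 for u in table[:i]) and \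
--            all(glue_pos(v, w) == -1 for w in table[i + 1:]):
--             out.append(v)
--     return out
-- ===== Notes on version B (the rewrite author's own statement) =====
-- stated objective: simpler
-- what changed: B replaces A's gluing helper (build a list of booleans, count False, then index it) with a single early-exit difference scan that stops at the second differing position, and eliminates A's mutable `index` bookkeeping and per-row flag: whether a vector is kept is decided statelessly by re-scanning the rows before it, glued rows are produced by a comprehension with slices instead of copy-and-mutate, and the trailing non-empty fallback disappears.
import Mathlib
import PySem

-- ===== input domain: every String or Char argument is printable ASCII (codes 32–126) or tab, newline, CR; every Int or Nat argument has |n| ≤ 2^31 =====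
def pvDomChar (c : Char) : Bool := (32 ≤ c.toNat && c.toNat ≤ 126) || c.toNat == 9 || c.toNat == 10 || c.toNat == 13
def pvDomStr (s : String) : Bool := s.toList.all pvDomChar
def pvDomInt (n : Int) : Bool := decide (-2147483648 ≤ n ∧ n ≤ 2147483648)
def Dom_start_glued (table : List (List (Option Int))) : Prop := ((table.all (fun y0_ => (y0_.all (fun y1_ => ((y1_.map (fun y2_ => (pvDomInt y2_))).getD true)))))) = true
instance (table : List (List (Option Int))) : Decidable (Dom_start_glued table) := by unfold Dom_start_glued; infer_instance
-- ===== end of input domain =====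

-- B (start_glued_alt) is a simpler decomposition of the same task: an early-exit
-- single-pass difference scan replaces A's build-a-bool-list/count/index helper, and
-- A's accumulated `index` list, per-row flag and non-empty fallback are replaced by a
-- stateless backward re-scan deciding which rows are kept.

-- ===== PORT A =====
def get_gluing_index (first_vector second_vector : List (Option Int)) : Int :=
  let result_vector : List Bool :=
    (PySem.List.pyRange 0 (first_vector.length : Int) 1).foldl
      (fun acc i =>
        acc ++ [PySem.List.pyGetD first_vector i none == PySem.List.pyGetD second_vector i none]) []
  if PySem.List.count result_vector false = 1 then
    match PySem.List.index? result_vector false with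
    | some k => (k : Int)
    | none => -1
  else -1

def start_glued (table : List (List (Option Int))) : List (List (Option Int)) :=
  let result :=
    (PySem.List.enumerate table 0).foldl
      (fun (acc : List (List (Option Int)) × List Int) iv =>
        let i := iv.1
        let vector := iv.2
        let inner :=
          (PySem.List.pyRange (i + 1) (table.length : Int) 1).foldl
            (fun (st : Bool × List Int × List (List (Option Int))) j =>
              let false_index := get_gluing_index vector (PySem.List.pyGetD table j [])
              if 0 ≤ false_index then
                (true, st.2.1 ++ [j], st.2.2 ++ [PySem.List.pySetD vector false_index none])
              else st)
            (false, acc.2, acc.1)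
        if inner.1 = false ∧ i ∉ inner.2.1 then
          (inner.2.2 ++ [vector], inner.2.1)
        else (inner.2.2, inner.2.1))
      ([], [])
  if result.1 = [] then table else result.1

-- ===== PORT B =====
def glue_pos_aux (v w : List (Option Int)) (k : Nat) (pos : Int) : Int :=
  if k < v.length then
    if PySem.List.pyGetD v (k : Int) none ≠ PySem.List.pyGetD w (k : Int) none then
      if pos ≠ -1 then -1 else glue_pos_aux v w (k + 1) (k : Int)
    else glue_pos_aux v w (k + 1) pos
  else pos
termination_by v.length - k

def glue_pos (v w : List (Option Int)) : Int := glue_pos_aux v w 0 (-1)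

def start_glued_alt (table : List (List (Option Int))) : List (List (Option Int)) :=
  (PySem.List.enumerate table 0).foldl
    (fun out iv =>
      let i := iv.1
      let v := iv.2
      let out := out ++
        (PySem.List.slice table (some (i + 1)) none).filterMap (fun w =>
          let p := glue_pos v w
          if p ≠ -1 then
            some (PySem.List.slice v none (some p) ++ [none] ++
                  PySem.List.slice v (some (p + 1)) none)
          else none)
      if (PySem.List.slice table none (some i)).all (fun u => glue_pos u v == -1) &&
         (PySem.List.slice table (some (i + 1)) none).all (fun w => glue_pos v w == -1) then
        out ++ [v]
      else out)
    []

-- ===== PRECONDITION & SPEC =====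
-- Pre_ excludes exactly the inputs on which the Python A raises IndexError:
-- get_gluing_index(table[i], table[j]) (i < j) indexes table[j] over range(len(table[i])),
-- so A raises iff some later row is shorter than some earlier row.
def Pre_start_glued (table : List (List (Option Int))) : Prop :=
  List.Pairwise (fun a b => a.length ≤ b.length) table
instance (table : List (List (Option Int))) : Decidable (Pre_start_glued table) := by
  unfold Pre_start_glued; infer_instance

def pvWitness_start_glued : List (List (Option Int)) :=
  [[some 0, some 1], [some 0, some 0], [some 1, some 0]]

def Spec_start_glued (table : List (List (Option Int))) (out : List (List (Option Int))) : Prop := out = start_glued_alt table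
instance (table : List (List (Option Int))) (out : List (List (Option Int))) : Decidable (Spec_start_glued table out) := by unfold Spec_start_glued; infer_instance

-- ===== CLAIM (what is proved, stated in full; the proofs are below) =====
def Claim_equal_start_glued : Prop := ∀ (table : List (List (Option Int))), Dom_start_glued table → Pre_start_glued table → Spec_start_glued table (start_glued table)

-- ===== LEMMAS AND PROOFS =====
theorem range_split (k n : Nat) (h : k < n) : List.range n = List.range k ++ k :: List.range' (k+1) (n - (k+1)) := by
  have h1 : n = k + ((n - (k+1)) + 1) := by omega
  rw [List.range_eq_range', h1, ← List.range'_append (s := 0) (m := k) (n := (n - (k+1)) + 1) (step := 1),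
      List.range'_succ]
  have h2 : k + ((n - (k+1)) + 1) - (k + 1) = n - (k+1) := by omega
  rw [h2]
  simp [List.range_eq_range']

def pvF (v w : List (Option Int)) (k : Nat) : Bool :=
  PySem.List.pyGetD v (k : Int) none == PySem.List.pyGetD w (k : Int) none

def pvPred (v w : List (Option Int)) (k : Nat) : Bool := !(pvF v w k)

def pvDif (v w : List (Option Int)) : List Nat :=
  (List.range v.length).filter (pvPred v w)

theorem rv_eq (v w : List (Option Int)) :
    (PySem.List.pyRange 0 (v.length : Int) 1).foldl
      (fun acc i =>
        acc ++ [PySem.List.pyGetD v i none == PySem.List.pyGetD w i none]) []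
    = (List.range v.length).map (pvF v w) := by
  rw [PySem.List.foldl_append_singleton_eq_map
        (fun i => PySem.List.pyGetD v i none == PySem.List.pyGetD w i none),
      PySem.List.pyRange_zero_nat, List.map_map]
  simp [pvF, Function.comp]

theorem count_rv (v w : List (Option Int)) :
    PySem.List.count ((List.range v.length).map (pvF v w)) false = (pvDif v w).length := by
  rw [PySem.List.count_eq, List.count_eq_countP, List.countP_map, pvDif,
      ← List.countP_eq_length_filter]
  apply List.countP_congr
  intro k _
  simp [pvPred, Function.comp]

theorem mem_pvDif (v w : List (Option Int)) (k : Nat) :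
    k ∈ pvDif v w ↔ k < v.length ∧ pvPred v w k = true := by
  simp [pvDif, List.mem_filter]

theorem index_rv (v w : List (Option Int)) (k : Nat) (hd : pvDif v w = [k]) :
    PySem.List.index? ((List.range v.length).map (pvF v w)) false = some k := by
  have hk : k ∈ pvDif v w := by rw [hd]; exact List.mem_singleton.mpr rfl
  obtain ⟨hkr, hkp⟩ := (mem_pvDif v w k).mp hk
  have honly : ∀ j, j < v.length → pvPred v w j = true → j = k := by
    intro j hj hp
    have : j ∈ pvDif v w := (mem_pvDif v w j).mpr ⟨hj, hp⟩
    rw [hd] at this; exact List.mem_singleton.mp this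
  rw [PySem.List.index?_eq_some_iff]
  refine ⟨(List.range k).map (pvF v w), (List.range' (k+1) (v.length - (k+1))).map (pvF v w), ?_, ?_, ?_⟩
  · rw [range_split k v.length hkr, List.map_append, List.map_cons]
    have : pvF v w k = false := by simpa [pvPred] using hkp
    rw [this]
  · simp
  · intro hmem
    rw [List.mem_map] at hmem
    obtain ⟨j, hj, hjf⟩ := hmem
    rw [List.mem_range] at hj
    have hjp : pvPred v w j = true := by simp [pvPred, hjf]
    have := honly j (by omega) hjp
    omega

theorem get_gluing_index_eq_match (v w : List (Option Int)) :
    get_gluing_index v w =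
      match pvDif v w with
      | [k] => (k : Int)
      | _ => -1 := by
  unfold get_gluing_index
  rw [rv_eq]
  show (if PySem.List.count ((List.range v.length).map (pvF v w)) false = 1 then
      match PySem.List.index? ((List.range v.length).map (pvF v w)) false with
      | some k => (k : Int)
      | none => -1
    else -1) = _
  rw [count_rv]
  rcases hd : pvDif v w with _ | ⟨k, _ | ⟨k2, t⟩⟩
  · simp
  · simp only [List.length_singleton]
    rw [index_rv v w k hd]
    simp
  · simp [List.length_cons]

-- tail of pvDif from position k on
def pvDifFrom (v w : List (Option Int)) (k : Nat) : List Nat :=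
  (List.range' k (v.length - k)).filter (pvPred v w)

theorem pvDifFrom_zero (v w : List (Option Int)) : pvDifFrom v w 0 = pvDif v w := by
  simp [pvDifFrom, pvDif, List.range_eq_range']

theorem pvDifFrom_ge (v w : List (Option Int)) (k : Nat) (h : v.length ≤ k) :
    pvDifFrom v w k = [] := by
  simp [pvDifFrom, Nat.sub_eq_zero_of_le h]

theorem pvDifFrom_succ (v w : List (Option Int)) (k : Nat) (h : k < v.length) :
    pvDifFrom v w k = (if pvPred v w k then [k] else []) ++ pvDifFrom v w (k+1) := by
  unfold pvDifFrom
  have h1 : v.length - k = (v.length - (k+1)) + 1 := by omega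
  rw [h1, List.range'_succ, List.filter_cons]
  split_ifs <;> simp_all

theorem pred_iff (v w : List (Option Int)) (k : Nat) :
    (PySem.List.pyGetD v (k : Int) none ≠ PySem.List.pyGetD w (k : Int) none) ↔ pvPred v w k = true := by
  simp [pvPred, pvF]

theorem glue_pos_aux_pos (v w : List (Option Int)) :
    ∀ k (p : Int), 0 ≤ p →
      glue_pos_aux v w k p = if pvDifFrom v w k = [] then p else -1 := by
  intro k p hp
  induction hn : v.length - k generalizing k p with
  | zero =>
    have hk : v.length ≤ k := by omega
    rw [glue_pos_aux, if_neg (by omega), pvDifFrom_ge v w k hk, if_pos rfl]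
  | succ m ih =>
    have hk : k < v.length := by omega
    rw [glue_pos_aux, if_pos hk]
    by_cases hne : PySem.List.pyGetD v (k : Int) none ≠ PySem.List.pyGetD w (k : Int) none
    · rw [if_pos hne, if_pos (by omega : p ≠ -1)]
      have : pvPred v w k = true := (pred_iff v w k).mp hne
      rw [pvDifFrom_succ v w k hk, this]
      simp
    · rw [if_neg hne, ih (k+1) p hp (by omega)]
      have : pvPred v w k = false := by
        rw [← Bool.not_eq_true]; exact fun hc => hne ((pred_iff v w k).mpr hc)
      rw [pvDifFrom_succ v w k hk, this]
      simp

theorem glue_pos_aux_neg (v w : List (Option Int)) :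
    ∀ k, glue_pos_aux v w k (-1) =
      match pvDifFrom v w k with
      | [j] => (j : Int)
      | _ => -1 := by
  intro k
  induction hn : v.length - k generalizing k with
  | zero =>
    have hk : v.length ≤ k := by omega
    rw [glue_pos_aux, if_neg (by omega), pvDifFrom_ge v w k hk]
  | succ m ih =>
    have hk : k < v.length := by omega
    rw [glue_pos_aux, if_pos hk]
    by_cases hne : PySem.List.pyGetD v (k : Int) none ≠ PySem.List.pyGetD w (k : Int) none
    · rw [if_pos hne, if_neg (by simp)]
      have hpk : pvPred v w k = true := (pred_iff v w k).mp hne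
      rw [glue_pos_aux_pos v w (k+1) (k : Int) (by positivity)]
      rw [pvDifFrom_succ v w k hk, hpk]
      rcases h2 : pvDifFrom v w (k+1) with _ | ⟨a, t⟩ <;> simp
    · rw [if_neg hne, ih (k+1) (by omega)]
      have hpk : pvPred v w k = false := by
        rw [← Bool.not_eq_true]; exact fun hc => hne ((pred_iff v w k).mpr hc)
      rw [pvDifFrom_succ v w k hk, hpk]
      simp

theorem glue_pos_eq_match (v w : List (Option Int)) :
    glue_pos v w =
      match pvDif v w with
      | [k] => (k : Int)
      | _ => -1 := by
  rw [glue_pos, glue_pos_aux_neg v w 0, pvDifFrom_zero]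

theorem glue_pos_eq_gluing (v w : List (Option Int)) :
    glue_pos v w = get_gluing_index v w := by
  rw [glue_pos_eq_match, get_gluing_index_eq_match]

theorem gluing_cases (v w : List (Option Int)) :
    get_gluing_index v w = -1 ∨
      ∃ k : Nat, k < v.length ∧ get_gluing_index v w = (k : Int) := by
  rw [get_gluing_index_eq_match]
  rcases hd : pvDif v w with _ | ⟨k, _ | _⟩
  · left; rfl
  · right
    refine ⟨k, ?_, rfl⟩
    have : k ∈ pvDif v w := by rw [hd]; exact List.mem_singleton.mpr rfl
    exact ((mem_pvDif v w k).mp this).1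
  · left; rfl

def pvRow (table : List (List (Option Int))) (t : Nat) : List (Option Int) := table.getD t []

def pvQ (v w : List (Option Int)) : Bool := decide (0 ≤ get_gluing_index v w)

def pvIdxSeg (table : List (List (Option Int))) (t : Nat) : List Int :=
  (PySem.List.pyRange ((t : Int) + 1) (table.length : Int) 1).filter
    (fun j => pvQ (pvRow table t) (PySem.List.pyGetD table j []))

def pvIA (table : List (List (Option Int))) (k : Nat) : List Int :=
  (List.range k).flatMap (pvIdxSeg table)

def pvFwd (table : List (List (Option Int))) (t : Nat) : List (List (Option Int)) :=
  ((table.drop (t + 1)).filter (pvQ (pvRow table t))).map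
    (fun w => PySem.List.pySetD (pvRow table t) (get_gluing_index (pvRow table t) w) none)

def pvContribA (table : List (List (Option Int))) (t : Nat) : List (List (Option Int)) :=
  pvFwd table t ++
    (if ((table.drop (t + 1)).any (pvQ (pvRow table t))) = false ∧ (t : Int) ∉ pvIA table t
     then [pvRow table t] else [])

def pvSA (table : List (List (Option Int))) (k : Nat) : List (List (Option Int)) :=
  (List.range k).flatMap (pvContribA table)

theorem innerA (table : List (List (Option Int))) (v : List (Option Int)) :
    ∀ (js : List Int) (f0 : Bool) (idx0 : List Int) (sh0 : List (List (Option Int))),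
      js.foldl
        (fun (st : Bool × List Int × List (List (Option Int))) j =>
          let false_index := get_gluing_index v (PySem.List.pyGetD table j [])
          if 0 ≤ false_index then
            (true, st.2.1 ++ [j], st.2.2 ++ [PySem.List.pySetD v false_index none])
          else st)
        (f0, idx0, sh0)
      = (f0 || js.any (fun j => pvQ v (PySem.List.pyGetD table j [])),
         idx0 ++ js.filter (fun j => pvQ v (PySem.List.pyGetD table j [])),
         sh0 ++ (js.filter (fun j => pvQ v (PySem.List.pyGetD table j []))).map
           (fun j => PySem.List.pySetD v (get_gluing_index v (PySem.List.pyGetD table j [])) none)) := by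
  intro js
  induction js with
  | nil => intro f0 idx0 sh0; simp
  | cons j js ih =>
    intro f0 idx0 sh0
    rw [List.foldl_cons]
    dsimp only
    by_cases h : 0 ≤ get_gluing_index v (PySem.List.pyGetD table j [])
    · rw [if_pos h, ih]
      simp [List.any_cons, pvQ, h, List.append_assoc]
    · rw [if_neg h, ih]
      simp [List.any_cons, pvQ, h]

theorem cast_succ (k : Nat) : ((k : Int) + 1) = ((k + 1 : Nat) : Int) := by push_cast; ring

theorem js_map_tbl (table : List (List (Option Int))) (k : Nat) :
    (PySem.List.pyRange ((k : Int) + 1) (table.length : Int) 1).map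
      (fun j => PySem.List.pyGetD table j []) = table.drop (k + 1) := by
  rw [cast_succ]
  have h := PySem.List.map_pyGetD_pyRange table [] (a := ((k + 1 : Nat) : Int)) (by positivity)
  simp only [PySem.List.len_eq] at h
  simpa using h

theorem stepA (table : List (List (Option Int))) (k : Nat) :
    (let i := (((k : Int), pvRow table k) : Int × List (Option Int)).1
     let vector := (((k : Int), pvRow table k) : Int × List (Option Int)).2
     let inner :=
       (PySem.List.pyRange (i + 1) (table.length : Int) 1).foldl
         (fun (st : Bool × List Int × List (List (Option Int))) j =>
           let false_index := get_gluing_index vector (PySem.List.pyGetD table j [])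
           if 0 ≤ false_index then
             (true, st.2.1 ++ [j], st.2.2 ++ [PySem.List.pySetD vector false_index none])
           else st)
         (false, ((pvSA table k, pvIA table k) : List (List (Option Int)) × List Int).2,
           ((pvSA table k, pvIA table k) : List (List (Option Int)) × List Int).1)
     if inner.1 = false ∧ i ∉ inner.2.1 then
       (inner.2.2 ++ [vector], inner.2.1)
     else (inner.2.2, inner.2.1))
    = (pvSA table (k + 1), pvIA table (k + 1)) := by
  dsimp only
  rw [innerA]
  dsimp only
  have hfilter : (PySem.List.pyRange ((k : Int) + 1) (table.length : Int) 1).filter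
      (fun j => pvQ (pvRow table k) (PySem.List.pyGetD table j [])) = pvIdxSeg table k := rfl
  have hmap : ((PySem.List.pyRange ((k : Int) + 1) (table.length : Int) 1).filter
        (fun j => pvQ (pvRow table k) (PySem.List.pyGetD table j []))).map
        (fun j => PySem.List.pySetD (pvRow table k)
          (get_gluing_index (pvRow table k) (PySem.List.pyGetD table j [])) none)
      = pvFwd table k := by
    rw [pvFwd, ← js_map_tbl table k, List.filter_map, List.map_map]
    rfl
  have hany : ((PySem.List.pyRange ((k : Int) + 1) (table.length : Int) 1).any
        (fun j => pvQ (pvRow table k) (PySem.List.pyGetD table j [])))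
      = (table.drop (k + 1)).any (pvQ (pvRow table k)) := by
    rw [← js_map_tbl table k, List.any_map]
    rfl
  have hnotin : ((k : Int) ∉ pvIA table k ++ pvIdxSeg table k) ↔ ((k : Int) ∉ pvIA table k) := by
    constructor
    · intro h hmem; exact h (List.mem_append.mpr (Or.inl hmem))
    · intro h hmem
      rcases List.mem_append.mp hmem with h1 | h2
      · exact h h1
      · have : (k : Int) ∈ PySem.List.pyRange ((k : Int) + 1) (table.length : Int) 1 :=
          List.mem_of_mem_filter h2
        have := (PySem.List.mem_pyRange_one).mp this
        omega
  rw [hmap, hany, hfilter]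
  have hSA : pvSA table (k + 1) = pvSA table k ++ pvContribA table k := by
    rw [pvSA, pvSA, List.range_succ, List.flatMap_append, List.flatMap_singleton]
  have hIA : pvIA table (k + 1) = pvIA table k ++ pvIdxSeg table k := by
    rw [pvIA, pvIA, List.range_succ, List.flatMap_append, List.flatMap_singleton]
  by_cases hc : ((table.drop (k + 1)).any (pvQ (pvRow table k))) = false ∧ (k : Int) ∉ pvIA table k
  · rw [if_pos ⟨by simp [hc.1], hnotin.mpr hc.2⟩]
    rw [hSA, hIA, pvContribA, if_pos hc]
    simp [List.append_assoc]
  · rw [if_neg (by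
      intro hcontra
      exact hc ⟨by simpa using hcontra.1, hnotin.mp hcontra.2⟩)]
    rw [hSA, hIA, pvContribA, if_neg hc]
    simp

theorem outerA (table : List (List (Option Int))) :
    ∀ (m k : Nat), k + m = table.length →
      (PySem.List.enumerate (table.drop k) (k : Int)).foldl
        (fun (acc : List (List (Option Int)) × List Int) iv =>
          let i := iv.1
          let vector := iv.2
          let inner :=
            (PySem.List.pyRange (i + 1) (table.length : Int) 1).foldl
              (fun (st : Bool × List Int × List (List (Option Int))) j =>
                let false_index := get_gluing_index vector (PySem.List.pyGetD table j [])
                if 0 ≤ false_index then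
                  (true, st.2.1 ++ [j], st.2.2 ++ [PySem.List.pySetD vector false_index none])
                else st)
              (false, acc.2, acc.1)
          if inner.1 = false ∧ i ∉ inner.2.1 then
            (inner.2.2 ++ [vector], inner.2.1)
          else (inner.2.2, inner.2.1))
        (pvSA table k, pvIA table k)
      = (pvSA table table.length, pvIA table table.length) := by
  intro m
  induction m with
  | zero =>
    intro k hk
    have h1 : table.drop k = [] := List.drop_eq_nil_of_le (by omega)
    have h2 : k = table.length := by omega
    rw [h1, h2]
    rfl
  | succ m ih =>
    intro k hk
    have hk' : k < table.length := by omega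
    have hdrop : table.drop k = table[k] :: table.drop (k + 1) :=
      List.drop_eq_getElem_cons hk'
    have hrow : table[k] = pvRow table k := by
      rw [pvRow, List.getD_eq_getElem table [] hk']
    rw [hdrop, hrow, PySem.List.enumerate_cons, List.foldl_cons, stepA table k, cast_succ]
    exact ih (k + 1) (by omega)

theorem startA_eq (table : List (List (Option Int))) :
    start_glued table =
      (if pvSA table table.length = [] then table else pvSA table table.length) := by
  unfold start_glued
  have h0 : PySem.List.enumerate table 0 = PySem.List.enumerate (table.drop 0) ((0 : Nat) : Int) := by
    simp
  rw [h0]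
  have := outerA table table.length 0 (by omega)
  rw [show pvSA table 0 = [] from rfl, show pvIA table 0 = [] from rfl] at this
  rw [this]

def pvGB (table : List (List (Option Int))) (iv : Int × List (Option Int)) :
    List (List (Option Int)) :=
  (PySem.List.slice table (some (iv.1 + 1)) none).filterMap (fun w =>
      let p := glue_pos iv.2 w
      if p ≠ -1 then
        some (PySem.List.slice iv.2 none (some p) ++ [none] ++
              PySem.List.slice iv.2 (some (p + 1)) none)
      else none)
  ++ (if (PySem.List.slice table none (some iv.1)).all (fun u => glue_pos u iv.2 == -1) &&
         (PySem.List.slice table (some (iv.1 + 1)) none).all (fun w => glue_pos iv.2 w == -1) then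
        [iv.2]
      else [])

def pvFwdB (table : List (List (Option Int))) (t : Nat) : List (List (Option Int)) :=
  (table.drop (t + 1)).filterMap (fun w =>
    let p := glue_pos (pvRow table t) w
    if p ≠ -1 then
      some (PySem.List.slice (pvRow table t) none (some p) ++ [none] ++
            PySem.List.slice (pvRow table t) (some (p + 1)) none)
    else none)

def pvContribB (table : List (List (Option Int))) (t : Nat) : List (List (Option Int)) :=
  pvFwdB table t ++
    (if (table.take t).all (fun u => glue_pos u (pvRow table t) == -1) &&
        (table.drop (t + 1)).all (fun w => glue_pos (pvRow table t) w == -1) then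
       [pvRow table t]
     else [])

def pvSB (table : List (List (Option Int))) (k : Nat) : List (List (Option Int)) :=
  (List.range k).flatMap (pvContribB table)

theorem pvGB_eq (table : List (List (Option Int))) (k : Nat) :
    pvGB table ((k : Int), pvRow table k) = pvContribB table k := by
  unfold pvGB pvContribB pvFwdB
  rw [cast_succ]
  rw [PySem.List.slice_from_natCast, PySem.List.slice_to_natCast]

theorem startB_eq (table : List (List (Option Int))) :
    start_glued_alt table = pvSB table table.length := by
  unfold start_glued_alt
  have hbody : (fun (out : List (List (Option Int))) (iv : Int × List (Option Int)) =>
      let i := iv.1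
      let v := iv.2
      let out := out ++
        (PySem.List.slice table (some (i + 1)) none).filterMap (fun w =>
          let p := glue_pos v w
          if p ≠ -1 then
            some (PySem.List.slice v none (some p) ++ [none] ++
                  PySem.List.slice v (some (p + 1)) none)
          else none)
      if (PySem.List.slice table none (some i)).all (fun u => glue_pos u v == -1) &&
         (PySem.List.slice table (some (i + 1)) none).all (fun w => glue_pos v w == -1) then
        out ++ [v]
      else out)
      = fun out iv => out ++ pvGB table iv := by
    funext out iv
    dsimp only [pvGB]
    by_cases hc : ((PySem.List.slice table none (some iv.1)).all (fun u => glue_pos u iv.2 == -1) &&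
         (PySem.List.slice table (some (iv.1 + 1)) none).all (fun w => glue_pos iv.2 w == -1)) = true
    · rw [if_pos hc, if_pos hc, List.append_assoc]
    · rw [if_neg hc, if_neg hc, List.append_nil]
  rw [hbody, PySem.List.foldl_append_eq_flatMap]
  have henum : PySem.List.enumerate table 0
      = (List.range table.length).map (fun (k : Nat) => ((k : Int), pvRow table k)) := by
    rw [PySem.List.enumerate_eq_map_pyRange table []]
    simp only [PySem.List.len_eq, PySem.List.pyRange_zero_nat, List.map_map]
    apply List.map_congr_left
    intro k hk
    simp only [Function.comp_apply, PySem.List.pyGetD_natCast]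
    rfl
  rw [henum, List.flatMap_map]
  rw [List.nil_append, pvSB]
  apply List.flatMap_congr
  intro k hk
  exact pvGB_eq table k

theorem ptw (v w : List (Option Int)) :
    pvQ v w = false ↔ ((glue_pos v w == -1) = true) := by
  rw [glue_pos_eq_gluing, pvQ]
  rcases gluing_cases v w with h | ⟨j, hj, h⟩ <;> rw [h] <;> simp

theorem set_eq_slices (v : List (Option Int)) (j : Nat) (hj : j < v.length) :
    PySem.List.pySetD v (j : Int) none =
      PySem.List.slice v none (some (j : Int)) ++ [none] ++
        PySem.List.slice v (some ((j : Int) + 1)) none := by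
  rw [PySem.List.pySetD_natCast, cast_succ, PySem.List.slice_to_natCast,
      PySem.List.slice_from_natCast, List.set_eq_take_append_cons_drop, if_pos hj]
  simp

theorem fwd_gen (v : List (Option Int)) :
    ∀ (l : List (List (Option Int))),
      (l.filter (pvQ v)).map (fun w => PySem.List.pySetD v (get_gluing_index v w) none)
      = l.filterMap (fun w =>
          let p := glue_pos v w
          if p ≠ -1 then
            some (PySem.List.slice v none (some p) ++ [none] ++
                  PySem.List.slice v (some (p + 1)) none)
          else none) := by
  intro l
  induction l with
  | nil => rfl
  | cons w l ih =>
    rw [List.filter_cons, List.filterMap_cons]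
    rcases gluing_cases v w with h | ⟨j, hj, h⟩
    · have h2 : glue_pos v w = -1 := by rw [glue_pos_eq_gluing, h]
      have h1 : pvQ v w = false := by rw [pvQ, h]; simp
      simp only [h1, h2, Bool.false_eq_true, if_false]
      simp only [ne_eq, not_true_eq_false, if_false]
      exact ih
    · have h2 : glue_pos v w = (j : Int) := by rw [glue_pos_eq_gluing, h]
      have h1 : pvQ v w = true := by rw [pvQ, h]; exact decide_eq_true (by positivity)
      have hne : ((j : Int)) ≠ -1 := by omega
      simp only [h1, h2, if_true, hne, ne_eq, not_false_eq_true]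
      rw [List.map_cons, ih, h, set_eq_slices v j hj]

theorem fwd_eq (table : List (List (Option Int))) (k : Nat) :
    pvFwd table k = pvFwdB table k := by
  rw [pvFwd, pvFwdB, fwd_gen]

theorem take_eq_map_range (table : List (List (Option Int))) (k : Nat) (hk : k ≤ table.length) :
    table.take k = (List.range k).map (pvRow table) := by
  apply List.ext_getElem
  · simp [hk]
  · intro t h1 h2
    have ht : t < k := by simpa using h2
    have htl : t < table.length := by omega
    simp only [List.getElem_take, List.getElem_map, List.getElem_range]
    rw [pvRow, List.getD_eq_getElem table [] htl]

theorem any_false_iff (v : List (Option Int)) (l : List (List (Option Int))) :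
    (l.any (pvQ v) = false) ↔ ((l.all (fun w => glue_pos v w == -1)) = true) := by
  rw [List.any_eq_false, List.all_eq_true]
  constructor
  · intro h w hw
    exact (ptw v w).mp (by simpa using h w hw)
  · intro h w hw
    simp only [Bool.not_eq_true]
    exact (ptw v w).mpr (h w hw)

theorem memIA_iff (table : List (List (Option Int))) (k : Nat) (hk : k < table.length) :
    ((k : Int) ∈ pvIA table k) ↔ ∃ t, t < k ∧ pvQ (pvRow table t) (pvRow table k) = true := by
  rw [pvIA, List.mem_flatMap]
  constructor
  · rintro ⟨t, ht, hmem⟩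
    rw [List.mem_range] at ht
    rw [pvIdxSeg, List.mem_filter] at hmem
    refine ⟨t, ht, ?_⟩
    have := hmem.2
    rwa [PySem.List.pyGetD_natCast, pvRow] at this
  · rintro ⟨t, ht, hq⟩
    refine ⟨t, List.mem_range.mpr ht, ?_⟩
    rw [pvIdxSeg, List.mem_filter]
    constructor
    · rw [PySem.List.mem_pyRange_one]
      constructor
      · omega
      · exact_mod_cast hk
    · rwa [PySem.List.pyGetD_natCast, ← pvRow]

theorem notin_iff (table : List (List (Option Int))) (k : Nat) (hk : k < table.length) :
    ((k : Int) ∉ pvIA table k) ↔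
      ((table.take k).all (fun u => glue_pos u (pvRow table k) == -1) = true) := by
  rw [memIA_iff table k hk, take_eq_map_range table k (by omega), List.all_map, List.all_eq_true]
  constructor
  · intro h t ht
    rw [List.mem_range] at ht
    exact (ptw _ _).mp (by
      rcases Bool.eq_false_or_eq_true (pvQ (pvRow table t) (pvRow table k)) with htr | hf
      · exact absurd ⟨t, ht, htr⟩ h
      · exact hf)
  · rintro h ⟨t, ht, hq⟩
    have := (ptw (pvRow table t) (pvRow table k)).mpr (h t (List.mem_range.mpr ht))
    rw [this] at hq
    cases hq

theorem contrib_eq (table : List (List (Option Int))) (k : Nat) (hk : k < table.length) :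
    pvContribA table k = pvContribB table k := by
  rw [pvContribA, pvContribB, fwd_eq]
  congr 1
  apply if_congr _ rfl rfl
  rw [Bool.and_eq_true]
  constructor
  · rintro ⟨h1, h2⟩
    exact ⟨(notin_iff table k hk).mp h2, (any_false_iff _ _).mp h1⟩
  · rintro ⟨h1, h2⟩
    exact ⟨(any_false_iff _ _).mpr h2, (notin_iff table k hk).mpr h1⟩

theorem SA_eq_SB (table : List (List (Option Int))) :
    pvSA table table.length = pvSB table table.length := by
  rw [pvSA, pvSB]
  apply List.flatMap_congr
  intro k hk
  exact contrib_eq table k (List.mem_range.mp hk)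

theorem SA_ne_nil (table : List (List (Option Int))) (h : table ≠ []) :
    pvSA table table.length ≠ [] := by
  rcases table with _ | ⟨v, rest⟩
  · exact absurd rfl h
  · intro hc
    rw [pvSA, List.flatMap_eq_nil_iff] at hc
    have h0 : pvContribA (v :: rest) 0 = [] :=
      hc 0 (List.mem_range.mpr (by simp))
    rw [pvContribA] at h0
    rcases List.append_eq_nil_iff.mp h0 with ⟨hfwd, hkeep⟩
    have hany : ((v :: rest).drop 1).any (pvQ (pvRow (v :: rest) 0)) = false := by
      rw [List.any_eq_false]
      intro w hw hq
      have : w ∈ ((v :: rest).drop 1).filter (pvQ (pvRow (v :: rest) 0)) :=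
        List.mem_filter.mpr ⟨hw, hq⟩
      rw [pvFwd, List.map_eq_nil_iff] at hfwd
      rw [hfwd] at this
      cases this
    rw [if_pos ⟨hany, by simp [pvIA]⟩] at hkeep
    cases hkeep

theorem start_glued_eq_alt (table : List (List (Option Int))) :
    start_glued table = start_glued_alt table := by
  rw [startA_eq, startB_eq, ← SA_eq_SB]
  by_cases h : pvSA table table.length = []
  · rw [if_pos h]
    rcases htab : table with _ | ⟨v, rest⟩
    · rfl
    · rw [htab] at h
      exact absurd h (SA_ne_nil (v :: rest) (by simp))
  · rw [if_neg h]

-- ===== VERDICT (by name: the statement is the Claim_ definition above) =====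
theorem start_glued_spec : Claim_equal_start_glued := by
  intro table _ _
  unfold Spec_start_glued
  exact start_glued_eq_alt table
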